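-- pv_equiv track=rewrite | github.com/newsdev/nyt-nj-campfin | njcampfin/get_property_contracts.py | parse_contact_info
-- ===== SOURCE A (Python) =====
-- def parse_contact_info(contact_html):
--     splittable = contact_html.replace('</br>', '').replace('<br/>', '')
--     fields = splittable.split('<br>')
--     address = ''
--     phone = ''
--     fax = ''
--     for field in fields:
--         if 'Phone' in field:
--             phone = field.split(':')[1].strip()
--         elif 'Fax' in field:
--             fax = field.split(':')[1].strip()
--         else:
--             address += field
--             address += ' '
--
--     return [address.strip(), phone.strip(), fax.strip()]
-- ===== SOURCE B (Python) =====
-- def parse_contact_info(contact_html):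
--     splittable = contact_html.replace('</br>', '').replace('<br/>', '')
--     fields = splittable.split('<br>')
--     address = ' '.join(f for f in fields if 'Phone' not in f and 'Fax' not in f).strip()
--     phone = next((f.split(':')[1].strip() for f in reversed(fields) if 'Phone' in f), '')
--     fax = next((f.split(':')[1].strip() for f in reversed(fields) if 'Fax' in f and 'Phone' not in f), '')
--     return [address, phone, fax]
-- ===== Notes on version B (the rewrite author's own statement) =====
-- stated objective: simpler
-- what changed: Replaces A's single accumulating loop over the fields with three independent computations: address as a ' '.join over the non-Phone/Fax fields, and phone/fax each as a single reversed scan picking the last matching field (Fax only when 'Phone' is absent, mirroring A's elif).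
import Mathlib
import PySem

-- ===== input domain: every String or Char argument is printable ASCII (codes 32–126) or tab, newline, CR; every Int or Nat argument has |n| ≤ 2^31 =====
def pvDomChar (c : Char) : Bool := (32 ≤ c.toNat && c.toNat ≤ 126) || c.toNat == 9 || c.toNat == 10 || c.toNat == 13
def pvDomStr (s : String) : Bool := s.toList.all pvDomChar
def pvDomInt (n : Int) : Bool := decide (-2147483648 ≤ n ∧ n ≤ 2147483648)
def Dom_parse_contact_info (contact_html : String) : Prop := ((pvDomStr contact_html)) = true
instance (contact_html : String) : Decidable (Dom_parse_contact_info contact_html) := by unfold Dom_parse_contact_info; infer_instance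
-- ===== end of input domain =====

-- B computes address/phone/fax independently (a join over the non-phone/fax fields; a reversed
-- scan picking the last matching field) instead of A's single accumulating loop; objective:
-- simpler decomposition, same cost.

-- ===== PORT A =====
def pvPhoneW : List Char := "Phone".toList
def pvFaxW : List Char := "Fax".toList

-- field.split(':')[1].strip()  (the '[1]' is in range under Pre_; pyGetD is the total form)
def pvField2 (field : List Char) : List Char :=
  PySem.Chars.strip (PySem.List.pyGetD (PySem.Chars.splitOn field ":".toList) 1 [])

-- the body of A's for-loop, acting on the state (address, phone, fax)
def pvStep (acc : List Char × List Char × List Char) (field : List Char) :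
    List Char × List Char × List Char :=
  if PySem.Chars.isIn pvPhoneW field then (acc.1, pvField2 field, acc.2.2)
  else if PySem.Chars.isIn pvFaxW field then (acc.1, acc.2.1, pvField2 field)
  else (acc.1 ++ field ++ [' '], acc.2.1, acc.2.2)

def parse_contact_info (contact_html : String) : List String :=
  let splittable := PySem.Chars.replace
    (PySem.Chars.replace contact_html.toList "</br>".toList []) "<br/>".toList []
  let fields := PySem.Chars.splitOn splittable "<br>".toList
  let st := fields.foldl pvStep ([], [], [])
  [String.ofList (PySem.Chars.strip st.1), String.ofList (PySem.Chars.strip st.2.1),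
   String.ofList (PySem.Chars.strip st.2.2)]

-- ===== PORT B =====
def parse_contact_info_alt (contact_html : String) : List String :=
  let splittable := PySem.Chars.replace
    (PySem.Chars.replace contact_html.toList "</br>".toList []) "<br/>".toList []
  let fields := PySem.Chars.splitOn splittable "<br>".toList
  let address := PySem.Chars.strip (PySem.Chars.join [' ']
    (fields.filter (fun f => !PySem.Chars.isIn pvPhoneW f && !PySem.Chars.isIn pvFaxW f)))
  let phone := match fields.reverse.find? (fun f => PySem.Chars.isIn pvPhoneW f) with
    | some f => pvField2 f
    | none => []
  let fax := match fields.reverse.find?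
      (fun f => PySem.Chars.isIn pvFaxW f && !PySem.Chars.isIn pvPhoneW f) with
    | some f => pvField2 f
    | none => []
  [String.ofList address, String.ofList phone, String.ofList fax]

-- ===== PRECONDITION & SPEC =====
-- Pre_ excludes exactly the inputs where Python A raises IndexError: a '<br>'-field that
-- mentions 'Phone' or 'Fax' but contains no ':' (field.split(':')[1] is out of range there).
def Pre_parse_contact_info (contact_html : String) : Prop :=
  ∀ f ∈ PySem.Chars.splitOn
      (PySem.Chars.replace (PySem.Chars.replace contact_html.toList "</br>".toList [])
        "<br/>".toList []) "<br>".toList,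
    (PySem.Chars.isIn pvPhoneW f = true ∨ PySem.Chars.isIn pvFaxW f = true) →
    2 ≤ (PySem.Chars.splitOn f ":".toList).length
instance (contact_html : String) : Decidable (Pre_parse_contact_info contact_html) := by
  unfold Pre_parse_contact_info; infer_instance

def pvWitness_parse_contact_info : String :=
  "12 Main St<br>Trenton NJ<br>Phone: 555-1212<br>Fax: 555-1213"

def Spec_parse_contact_info (contact_html : String) (out : List String) : Prop := out = parse_contact_info_alt contact_html
instance (contact_html : String) (out : List String) : Decidable (Spec_parse_contact_info contact_html out) := by unfold Spec_parse_contact_info; infer_instance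

-- ===== CLAIM (what is proved, stated in full; the proofs are below) =====
def Claim_equal_parse_contact_info : Prop := ∀ (contact_html : String), Dom_parse_contact_info contact_html → Pre_parse_contact_info contact_html → Spec_parse_contact_info contact_html (parse_contact_info contact_html)

-- ===== LEMMAS AND PROOFS =====

lemma pvRstrip_append_space (t : List Char) :
    PySem.Chars.rstrip (t ++ [' ']) = PySem.Chars.rstrip t := by
  simp [PySem.Chars.rstrip, show PySem.Chars.isspace ' ' = true from rfl]

lemma pvStrip_append_space (s : List Char) :
    PySem.Chars.strip (s ++ [' ']) = PySem.Chars.strip s := by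
  induction s with
  | nil => rfl
  | cons c s ih =>
    by_cases h : PySem.Chars.isspace c = true
    · simpa [PySem.Chars.strip, PySem.Chars.lstrip, List.dropWhile_cons, h] using ih
    · have h1 : PySem.Chars.lstrip ((c :: s) ++ [' ']) = (c :: s) ++ [' '] := by
        simp [PySem.Chars.lstrip, h]
      have h2 : PySem.Chars.lstrip (c :: s) = c :: s := by
        simp [PySem.Chars.lstrip, h]
      simp only [PySem.Chars.strip, h1, h2]
      exact pvRstrip_append_space (c :: s)

lemma pvRstrip_rstrip (s : List Char) :
    PySem.Chars.rstrip (PySem.Chars.rstrip s) = PySem.Chars.rstrip s := by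
  simp [PySem.Chars.rstrip, List.dropWhile_idempotent]

lemma pvRstrip_prefix (s : List Char) : PySem.Chars.rstrip s <+: s := by
  have h : List.dropWhile PySem.Chars.isspace s.reverse <:+ s.reverse :=
    List.dropWhile_suffix _
  have := List.reverse_prefix.mpr h
  simpa [PySem.Chars.rstrip] using this

lemma pvLstrip_eq_self_of_prefix {l l' : List Char}
    (h : PySem.Chars.lstrip l = l) (hp : l' <+: l) :
    PySem.Chars.lstrip l' = l' := by
  cases l' with
  | nil => rfl
  | cons c w =>
    cases l with
    | nil => simp at hp
    | cons d v =>
      obtain ⟨t, ht⟩ := hp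
      have hcd : c = d := by injection ht with h1 _
      subst hcd
      have hc : PySem.Chars.isspace c = false := by
        by_cases h1 : PySem.Chars.isspace c = true
        · exfalso
          have hv := h
          simp only [PySem.Chars.lstrip, List.dropWhile_cons, h1, if_true] at hv
          have hlen := List.length_dropWhile_le PySem.Chars.isspace v
          rw [hv] at hlen
          simp at hlen
        · simpa using h1
      simp [PySem.Chars.lstrip, hc]

lemma pvStrip_idem (s : List Char) :
    PySem.Chars.strip (PySem.Chars.strip s) = PySem.Chars.strip s := by
  have hl : PySem.Chars.lstrip (PySem.Chars.lstrip s) = PySem.Chars.lstrip s := by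
    simp [PySem.Chars.lstrip, List.dropWhile_idempotent]
  have hpre : PySem.Chars.rstrip (PySem.Chars.lstrip s) <+: PySem.Chars.lstrip s :=
    pvRstrip_prefix _
  have h2 : PySem.Chars.lstrip (PySem.Chars.rstrip (PySem.Chars.lstrip s)) =
      PySem.Chars.rstrip (PySem.Chars.lstrip s) :=
    pvLstrip_eq_self_of_prefix hl hpre
  simp only [PySem.Chars.strip, h2, pvRstrip_rstrip]

lemma pvFlatMap_eq (l : List (List Char)) (h : l ≠ []) :
    l.flatMap (fun f => f ++ [' ']) = PySem.Chars.join [' '] l ++ [' '] := by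
  induction l with
  | nil => exact absurd rfl h
  | cons x l ih =>
    cases l with
    | nil => simp [PySem.Chars.join, List.intercalate]
    | cons y t =>
      have := ih (by simp)
      simp only [List.flatMap_cons] at this ⊢
      rw [this]
      simp [PySem.Chars.join, List.intercalate, List.intersperse_cons₂]

lemma pvFlatMap_join (l : List (List Char)) :
    PySem.Chars.strip (l.flatMap (fun f => f ++ [' '])) =
    PySem.Chars.strip (PySem.Chars.join [' '] l) := by
  cases h : l with
  | nil => rfl
  | cons x t =>
    rw [← h, pvFlatMap_eq l (by simp [h]), pvStrip_append_space]

lemma pvFold (fs : List (List Char)) (acc : List Char × List Char × List Char) :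
    fs.foldl pvStep acc =
      (acc.1 ++ (fs.filter (fun f => !PySem.Chars.isIn pvPhoneW f && !PySem.Chars.isIn pvFaxW f)).flatMap (fun f => f ++ [' ']),
       (match fs.reverse.find? (fun f => PySem.Chars.isIn pvPhoneW f) with
        | some f => pvField2 f | none => acc.2.1),
       (match fs.reverse.find? (fun f => PySem.Chars.isIn pvFaxW f && !PySem.Chars.isIn pvPhoneW f) with
        | some f => pvField2 f | none => acc.2.2)) := by
  induction fs generalizing acc with
  | nil => simp
  | cons f fs ih =>
    rw [List.foldl_cons, ih]
    by_cases hP : PySem.Chars.isIn pvPhoneW f = true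
    · cases hx : fs.reverse.find? (fun f => PySem.Chars.isIn pvPhoneW f) <;>
      cases hy : fs.reverse.find? (fun f => PySem.Chars.isIn pvFaxW f && !PySem.Chars.isIn pvPhoneW f) <;>
        simp [pvStep, hP, List.find?_append, hx, hy]
    · by_cases hF : PySem.Chars.isIn pvFaxW f = true
      · cases hx : fs.reverse.find? (fun f => PySem.Chars.isIn pvPhoneW f) <;>
        cases hy : fs.reverse.find? (fun f => PySem.Chars.isIn pvFaxW f && !PySem.Chars.isIn pvPhoneW f) <;>
          simp [pvStep, hP, hF, List.find?_append, hx, hy]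
      · cases hx : fs.reverse.find? (fun f => PySem.Chars.isIn pvPhoneW f) <;>
        cases hy : fs.reverse.find? (fun f => PySem.Chars.isIn pvFaxW f && !PySem.Chars.isIn pvPhoneW f) <;>
          simp [pvStep, hP, hF, List.find?_append, hx, hy]

-- ===== VERDICT (by name: the statement is the Claim_ definition above) =====
theorem parse_contact_info_spec : Claim_equal_parse_contact_info := by
  intro s _ _
  unfold Spec_parse_contact_info parse_contact_info parse_contact_info_alt
  simp only [pvFold, List.nil_append, List.cons.injEq, and_true]
  refine ⟨congrArg _ (pvFlatMap_join _), ?_, ?_⟩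
  · cases hx : List.find? (fun f => PySem.Chars.isIn pvPhoneW f)
        (PySem.Chars.splitOn (PySem.Chars.replace
          (PySem.Chars.replace s.toList "</br>".toList []) "<br/>".toList [])
          "<br>".toList).reverse with
    | none => rfl
    | some f => simp [pvField2, pvStrip_idem]
  · cases hy : List.find? (fun f => PySem.Chars.isIn pvFaxW f && !PySem.Chars.isIn pvPhoneW f)
        (PySem.Chars.splitOn (PySem.Chars.replace
          (PySem.Chars.replace s.toList "</br>".toList []) "<br/>".toList [])
          "<br>".toList).reverse with
    | none => rfl
    | some f => simp [pvField2, pvStrip_idem]
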